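-- pv_equiv track=rewrite | github.com/beanbaginc/django-evolution | django_evolution/utils/sql.py | _prepare_transaction_batches
-- ===== SOURCE A (Python) =====
-- def _prepare_transaction_batches(prepared_sql):
--     """Prepare batches of SQL statements to run together.
--
--     This takes in prepared SQL statements and generates batches of
--     statements to run together inside or outside of a transaction.
--
--     Args:
--         prepared_sql (list of tuple):
--             A list of SQL statement information generated by
--             :py:meth:`_prepare_sql`.
--
--     Yields:
--         tuple:
--         Information on a batch of statements to to execute. This will be
--         a tuple containing:
--
--         1. The list of SQL statements.
--         2. Whether to execute these statements in a transaction.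
--     """
--     batch = None
--     last_use_transaction = None
--
--     for (statement, params, use_transaction,
--          new_transaction) in prepared_sql:
--         if new_transaction or use_transaction is not last_use_transaction:
--             if batch:
--                 yield batch, last_use_transaction
--
--             batch = []
--             last_use_transaction = use_transaction
--
--         batch.append((statement, params))
--
--     if batch:
--         yield batch, last_use_transaction
-- ===== SOURCE B (Python) =====
-- def _prepare_transaction_batches(prepared_sql):
--     """Two-pointer span scan: for each batch, find where it ends, then slice."""
--     items = list(prepared_sql)
--     n = len(items)
--     i = 0
--     while i < n:
--         use = items[i][2]
--         j = i + 1
--         while j < n and not items[j][3] and items[j][2] is use: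
--             j += 1
--         yield [(s, p) for s, p, _, _ in items[i:j]], use
--         i = j
-- ===== Notes on version B (the rewrite author's own statement) =====
-- stated objective: alternative
-- what changed: Replaced the batch/last_use_transaction accumulator state machine with a two-pointer span scan: each batch is the maximal span starting at the current index whose items keep the first item's use_transaction and do not request a new transaction, yielded by slicing.
import Mathlib
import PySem

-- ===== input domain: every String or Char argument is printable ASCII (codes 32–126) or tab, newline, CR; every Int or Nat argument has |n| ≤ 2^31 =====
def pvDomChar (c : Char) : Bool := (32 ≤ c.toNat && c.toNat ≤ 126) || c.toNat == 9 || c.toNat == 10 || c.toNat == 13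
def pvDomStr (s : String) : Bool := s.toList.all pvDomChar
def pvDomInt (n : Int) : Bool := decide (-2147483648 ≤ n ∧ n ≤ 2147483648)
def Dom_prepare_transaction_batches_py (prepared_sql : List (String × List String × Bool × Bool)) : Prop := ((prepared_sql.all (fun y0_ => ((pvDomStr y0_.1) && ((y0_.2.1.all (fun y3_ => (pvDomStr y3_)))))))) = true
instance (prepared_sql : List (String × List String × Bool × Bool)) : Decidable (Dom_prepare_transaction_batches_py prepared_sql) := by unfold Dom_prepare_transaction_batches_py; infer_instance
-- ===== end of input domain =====

-- B replaces A's batch/last_use_transaction accumulator state machine with a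
-- two-pointer span scan (take the maximal same-transaction span, then recurse); alternative decomposition, same cost.

-- ===== PORT A =====
-- A's loop body: maybe close the current batch and reset, then append (statement, params).
def pvStepA
    (st : List (String × List String) × Option Bool × List ((List (String × List String)) × Bool))
    (it : String × List String × Bool × Bool) :
    List (String × List String) × Option Bool × List ((List (String × List String)) × Bool) :=
  let batch := st.1
  let last := st.2.1
  let acc := st.2.2
  -- if new_transaction or use_transaction is not last_use_transaction:
  let st' :=
    if it.2.2.2 || (some it.2.2.1 != last) then
      (([] : List (String × List String)), some it.2.2.1,
       if batch.isEmpty then acc else acc ++ [(batch, last.getD false)])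
    else (batch, last, acc)
  (st'.1 ++ [(it.1, it.2.1)], st'.2.1, st'.2.2)

-- trailing 'if batch: yield batch, last_use_transaction'
def pvFinishA
    (st : List (String × List String) × Option Bool × List ((List (String × List String)) × Bool)) :
    List ((List (String × List String)) × Bool) :=
  if st.1.isEmpty then st.2.2 else st.2.2 ++ [(st.1, st.2.1.getD false)]

def prepare_transaction_batches_py (prepared_sql : List (String × List String × Bool × Bool)) : List ((List (String × List String)) × Bool) :=
  pvFinishA (prepared_sql.foldl pvStepA ([], none, []))

-- ===== PORT B =====
-- B's inner while loop: the span of items that stay in the batch opened with use_transaction = use.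
def pvTakeGroup (use : Bool) :
    List (String × List String × Bool × Bool) →
    List (String × List String × Bool × Bool) × List (String × List String × Bool × Bool)
  | [] => ([], [])
  | x :: xs =>
    if !x.2.2.2 && (x.2.2.1 == use) then
      let r := pvTakeGroup use xs
      (x :: r.1, r.2)
    else ([], x :: xs)

theorem pvTakeGroup_len (use : Bool) (l : List (String × List String × Bool × Bool)) :
    (pvTakeGroup use l).2.length ≤ l.length := by
  induction l with
  | nil => simp [pvTakeGroup]
  | cons x xs ih =>
    simp only [pvTakeGroup]
    split
    · exact le_trans ih (Nat.le_succ _)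
    · simp

def prepare_transaction_batches_py_alt (prepared_sql : List (String × List String × Bool × Bool)) : List ((List (String × List String)) × Bool) :=
  match prepared_sql with
  | [] => []
  | x :: xs =>
    let use := x.2.2.1
    let g := pvTakeGroup use xs
    ((x :: g.1).map (fun it => (it.1, it.2.1)), use) :: prepare_transaction_batches_py_alt g.2
  termination_by prepared_sql.length
  decreasing_by
    exact Nat.lt_succ_of_le (pvTakeGroup_len _ _)

-- ===== PRECONDITION & SPEC =====
def Spec_prepare_transaction_batches_py (prepared_sql : List (String × List String × Bool × Bool)) (out : List ((List (String × List String)) × Bool)) : Prop := out = prepare_transaction_batches_py_alt prepared_sql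
instance (prepared_sql : List (String × List String × Bool × Bool)) (out : List ((List (String × List String)) × Bool)) : Decidable (Spec_prepare_transaction_batches_py prepared_sql out) := by unfold Spec_prepare_transaction_batches_py; infer_instance

-- ===== CLAIM (what is proved, stated in full; the proofs are below) =====
def Claim_equal_prepare_transaction_batches_py : Prop := ∀ (prepared_sql : List (String × List String × Bool × Bool)), Dom_prepare_transaction_batches_py prepared_sql → Spec_prepare_transaction_batches_py prepared_sql (prepare_transaction_batches_py prepared_sql)

-- ===== LEMMAS AND PROOFS =====

-- Invariant: inside an open nonempty batch with last = some use, A's remaining fold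
-- produces exactly the span pvTakeGroup finds, then continues like B.
theorem pvFoldA_group
    (l : List (String × List String × Bool × Bool)) :
    ∀ (batch : List (String × List String)) (use : Bool)
      (acc : List ((List (String × List String)) × Bool)), batch ≠ [] →
    pvFinishA (l.foldl pvStepA (batch, some use, acc)) =
      acc ++ ((batch ++ (pvTakeGroup use l).1.map (fun it => (it.1, it.2.1)), use)
               :: prepare_transaction_batches_py_alt (pvTakeGroup use l).2) := by
  induction l with
  | nil =>
    intro batch use acc hb
    simp [pvTakeGroup, pvFinishA, prepare_transaction_batches_py_alt, hb]
  | cons x xs ih =>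
    intro batch use acc hb
    by_cases h : (!x.2.2.2 && (x.2.2.1 == use)) = true
    · -- stays in the batch
      have hnew : x.2.2.2 = false := by
        cases hx : x.2.2.2 <;> simp [hx] at h ⊢
      have huse : x.2.2.1 = use := by
        cases hx : x.2.2.2 <;> simp [hx] at h
        · exact h
      have hstep : pvStepA (batch, some use, acc) x
          = (batch ++ [(x.1, x.2.1)], some use, acc) := by
        simp [pvStepA, hnew, huse]
      have hne : batch ++ [(x.1, x.2.1)] ≠ [] := by simp
      calc pvFinishA ((x :: xs).foldl pvStepA (batch, some use, acc))
          = pvFinishA (xs.foldl pvStepA (batch ++ [(x.1, x.2.1)], some use, acc)) := by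
            rw [List.foldl_cons, hstep]
        _ = _ := by
            rw [ih _ use acc hne]
            simp [pvTakeGroup, h]
    · -- boundary: close batch, open new one
      have hstep : pvStepA (batch, some use, acc) x
          = ([(x.1, x.2.1)], some x.2.2.1, acc ++ [(batch, use)]) := by
        simp only [pvStepA]
        have hcond : (x.2.2.2 || (some x.2.2.1 != some use)) = true := by
          cases hx : x.2.2.2 <;> simp [hx] at h ⊢
          · exact h
        simp [hcond, List.isEmpty_eq_false_iff.mpr hb]
      have hne : [((x.1 : String), x.2.1)] ≠ ([] : List (String × List String)) := by simp
      calc pvFinishA ((x :: xs).foldl pvStepA (batch, some use, acc))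
          = pvFinishA (xs.foldl pvStepA ([(x.1, x.2.1)], some x.2.2.1, acc ++ [(batch, use)])) := by
            rw [List.foldl_cons, hstep]
        _ = _ := by
            rw [ih _ x.2.2.1 _ hne]
            simp [pvTakeGroup, h, prepare_transaction_batches_py_alt]

-- ===== VERDICT (by name: the statement is the Claim_ definition above) =====
theorem prepare_transaction_batches_py_spec : Claim_equal_prepare_transaction_batches_py := by
  intro prepared_sql _
  unfold Spec_prepare_transaction_batches_py prepare_transaction_batches_py
  cases prepared_sql with
  | nil => simp [pvFinishA, prepare_transaction_batches_py_alt]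
  | cons x xs =>
    have hstep : pvStepA ([], none, []) x
        = ([(x.1, x.2.1)], some x.2.2.1, []) := by
      simp [pvStepA]
    rw [List.foldl_cons, hstep,
        pvFoldA_group xs [(x.1, x.2.1)] x.2.2.1 [] (by simp)]
    simp [prepare_transaction_batches_py_alt]
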